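-- pv_equiv track=rewrite | github.com/MrBrantCode/unitest_baseline | mut_generate/mist_train_taco/taco_16315/solution.py | calculate_lucky_sum
-- ===== SOURCE A (Python) =====
-- def calculate_lucky_sum(l, r):
--     # Generate all lucky numbers up to the maximum possible value within the range
--     a = []
--     x = []
--     a.append([])
--     a[0].append('4')
--     a[0].append('7')
--     for i in range(1, 10):
--         a.append([])
--         for j in a[i - 1]:
--             a[i].append('4' + j)
--             a[i].append('7' + j)
--         for j in a[i]:
--             x.append(int(j))
--     x.append(4)
--     x.append(7)
--     x.sort()
--
--     # Precompute the sum of next lucky numbers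
--     sum = [16]
--     for i in range(1, len(x)):
--         sum.append((x[i] - x[i - 1]) * x[i] + sum[i - 1])
--
--     # Find the indices in the sorted list of lucky numbers
--     for i in range(len(x)):
--         if x[i] >= l:
--             t = i
--             break
--     for i in range(len(x)):
--         if x[i] >= r:
--             e = i
--             break
--
--     # Calculate the result
--     res = sum[e] - sum[t] - x[e] * (x[e] - r) + (x[t] - l + 1) * x[t]
--     return res
-- ===== SOURCE B (Python) =====
-- def calculate_lucky_sum(l, r):
--     # enumerate every lucky number with 1..10 digits via bitmasks (bit = digit choice)
--     nums = []
--     for d in range(1, 11):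
--         for i in range(1 << d):
--             n = 0
--             for _ in range(d):
--                 n = n * 10 + (4 if i % 2 == 0 else 7)
--                 i //= 2
--             nums.append(n)
--     nums.sort()
--
--     def prefix(m):
--         # sum of next(k) for k = 1..m (extended linearly below 1)
--         total, prev = 0, 0
--         for x in nums:
--             if m <= x:
--                 return total + (m - prev) * x
--             total += (x - prev) * x
--             prev = x
--         return total  # unreachable: m never exceeds the largest generated lucky number
--
--     return prefix(r) - prefix(l - 1)
-- ===== Notes on version B (the rewrite author's own statement) =====
-- stated objective: alternative
-- what changed: B enumerates lucky numbers by bitmask instead of recursive string concatenation and replaces A's precomputed prefix-sum table plus two linear index searches and correction terms by a single fused scan function evaluated at r and l-1, returning prefix(r) - prefix(l-1).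
import Mathlib
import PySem

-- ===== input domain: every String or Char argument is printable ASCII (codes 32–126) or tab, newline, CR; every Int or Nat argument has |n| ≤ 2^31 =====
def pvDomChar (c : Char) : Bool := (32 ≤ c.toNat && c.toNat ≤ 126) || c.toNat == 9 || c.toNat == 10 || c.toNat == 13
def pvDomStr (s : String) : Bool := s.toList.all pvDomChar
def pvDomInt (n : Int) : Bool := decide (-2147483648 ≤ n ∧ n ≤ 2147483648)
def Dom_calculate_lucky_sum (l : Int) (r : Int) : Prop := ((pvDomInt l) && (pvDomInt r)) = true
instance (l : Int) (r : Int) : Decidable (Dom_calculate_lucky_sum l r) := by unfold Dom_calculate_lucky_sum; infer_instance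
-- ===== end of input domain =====

-- B replaces A's prefix-sum table plus two index searches by a single fused scan of the
-- sorted lucky numbers evaluated at r and l-1 (objective: alternative; same value on all of Dom).

-- ===== PORT A =====
-- strings are carried as List Char (PySem.Chars representation); int(j) always parses here,
-- so the `.getD 0` fallback of ofChars? is unreachable
def pvA_gen : List (List (List Char)) × List Int :=
  (PySem.List.pyRange 1 10 1).foldl
    (fun st i =>
      let ai := (PySem.List.pyGetD st.1 (i - 1) []).foldl
        (fun ai j => ai ++ [['4'] ++ j, ['7'] ++ j]) []
      (st.1 ++ [ai], ai.foldl (fun x j => x ++ [(PySem.Int.ofChars? j).getD 0]) st.2))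
    ([[['4'], ['7']]], [])

def pvA_x : List Int := PySem.List.sorted (pvA_gen.2 ++ [4, 7]) (fun v => v) false

def pvA_sums : List Int :=
  (PySem.List.pyRange 1 (pvA_x.length : Int) 1).foldl (fun s i =>
    s ++ [(PySem.List.pyGetD pvA_x i 0 - PySem.List.pyGetD pvA_x (i - 1) 0) * PySem.List.pyGetD pvA_x i 0
          + PySem.List.pyGetD s (i - 1) 0]) [16]

-- the `for i in range(len(x)): if x[i] >= v: t = i; break` scan
def pvA_find : List Int → Int → Option Nat
  | [], _ => none
  | x :: rest, v => if x ≥ v then some 0 else (pvA_find rest v).map (· + 1)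

def calculate_lucky_sum (l : Int) (r : Int) : Int :=
  -- when a scan finds no index Python raises UnboundLocalError; that is unreachable on Dom
  -- (the list holds values above 2^31), so the `.getD 0` default is never taken there
  let t := (pvA_find pvA_x l).getD 0
  let e := (pvA_find pvA_x r).getD 0
  pvA_sums.getD e 0 - pvA_sums.getD t 0 - pvA_x.getD e 0 * (pvA_x.getD e 0 - r)
    + (pvA_x.getD t 0 - l + 1) * pvA_x.getD t 0

-- ===== PORT B =====
def pvB_raw : List Int :=
  (PySem.List.pyRange 1 11 1).foldl (fun nums d =>
    (PySem.List.pyRange 0 ((1 : Int) <<< d.toNat) 1).foldl (fun nums i =>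
      nums ++ [((PySem.List.pyRange 0 d 1).foldl (fun (st : Int × Int) _ =>
        (st.1 * 10 + (if PySem.Int.mod st.2 2 = 0 then 4 else 7), PySem.Int.floordiv st.2 2)) (0, i)).1])
    nums) []

def pvB_lucky : List Int := PySem.List.sorted pvB_raw (fun v => v) false

def pvB_prefix : List Int → Int → Int → Int → Int
  | [], total, _, _ => total
  | x :: rest, total, prev, m =>
    if m ≤ x then total + (m - prev) * x
    else pvB_prefix rest (total + (x - prev) * x) x m

def calculate_lucky_sum_alt (l : Int) (r : Int) : Int :=
  pvB_prefix pvB_lucky 0 0 r - pvB_prefix pvB_lucky 0 0 (l - 1)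

-- ===== PRECONDITION & SPEC =====
def Spec_calculate_lucky_sum (l : Int) (r : Int) (out : Int) : Prop := out = calculate_lucky_sum_alt l r
instance (l : Int) (r : Int) (out : Int) : Decidable (Spec_calculate_lucky_sum l r out) := by unfold Spec_calculate_lucky_sum; infer_instance

-- ===== CLAIM (what is proved, stated in full; the proofs are below) =====
def Claim_equal_calculate_lucky_sum : Prop := ∀ (l : Int) (r : Int), Dom_calculate_lucky_sum l r → Spec_calculate_lucky_sum l r (calculate_lucky_sum l r)

-- ===== LEMMAS AND PROOFS =====

-- ---- generation facts: A's string blocks and B's bitmask blocks agree ----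

-- the loop body of A's generation, named so the fold can be stepped
def AstepFn (st : List (List (List Char)) × List Int) (i : Int) :
    List (List (List Char)) × List Int :=
  let ai := (PySem.List.pyGetD st.1 (i - 1) []).foldl
    (fun ai j => ai ++ [['4'] ++ j, ['7'] ++ j]) []
  (st.1 ++ [ai], ai.foldl (fun x j => x ++ [(PySem.Int.ofChars? j).getD 0]) st.2)

theorem pv_fn : pvA_gen = List.foldl AstepFn ([[['4'], ['7']]], []) (PySem.List.pyRange 1 10 1) := rfl

def expand (b : List (List Char)) : List (List Char) :=
  b.flatMap (fun j => [['4'] ++ j, ['7'] ++ j])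

def parseBlock (b : List (List Char)) : List Int :=
  b.flatMap (fun j => [(PySem.Int.ofChars? j).getD 0])

def S1 : List (List Char) := [['4'], ['7']]
def S2 : List (List Char) := expand S1
def S3 : List (List Char) := expand S2
def S4 : List (List Char) := expand S3
def S5 : List (List Char) := expand S4
def S6 : List (List Char) := expand S5
def S7 : List (List Char) := expand S6
def S8 : List (List Char) := expand S7
def S9 : List (List Char) := expand S8
def S10 : List (List Char) := expand S9

theorem Astep_eq (aList : List (List (List Char))) (X : List Int) (i : Int)
    (B : List (List Char)) (hi : PySem.List.pyGetD aList (i - 1) [] = B) :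
    AstepFn (aList, X) i = (aList ++ [expand B], X ++ parseBlock (expand B)) := by
  simp only [AstepFn, hi, PySem.List.foldl_append_eq_flatMap, List.nil_append]
  rfl

theorem pv_Ashape : pvA_gen.2 = parseBlock S2 ++ parseBlock S3 ++ parseBlock S4 ++ parseBlock S5
    ++ parseBlock S6 ++ parseBlock S7 ++ parseBlock S8 ++ parseBlock S9 ++ parseBlock S10 := by
  rw [pv_fn, show PySem.List.pyRange 1 10 1 = [1,2,3,4,5,6,7,8,9] from by decide]
  rw [List.foldl_cons, Astep_eq _ _ 1 S1 (by rfl)]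
  rw [List.foldl_cons, Astep_eq _ _ 2 S2 (by rfl)]
  rw [List.foldl_cons, Astep_eq _ _ 3 S3 (by rfl)]
  rw [List.foldl_cons, Astep_eq _ _ 4 S4 (by rfl)]
  rw [List.foldl_cons, Astep_eq _ _ 5 S5 (by rfl)]
  rw [List.foldl_cons, Astep_eq _ _ 6 S6 (by rfl)]
  rw [List.foldl_cons, Astep_eq _ _ 7 S7 (by rfl)]
  rw [List.foldl_cons, Astep_eq _ _ 8 S8 (by rfl)]
  rw [List.foldl_cons, Astep_eq _ _ 9 S9 (by rfl)]
  rw [List.foldl_nil]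
  simp only [show expand S1 = S2 from rfl, show expand S2 = S3 from rfl,
    show expand S3 = S4 from rfl, show expand S4 = S5 from rfl, show expand S5 = S6 from rfl,
    show expand S6 = S7 from rfl, show expand S7 = S8 from rfl, show expand S8 = S9 from rfl,
    show expand S9 = S10 from rfl, List.nil_append]

-- B's per-width block: the value built from the bits of i, and the map over all masks
def gB (d : Int) (i : Int) : Int :=
  ((PySem.List.pyRange 0 d 1).foldl (fun (st : Int × Int) _ =>
    (st.1 * 10 + (if PySem.Int.mod st.2 2 = 0 then 4 else 7), PySem.Int.floordiv st.2 2)) (0, i)).1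

def blockB (d : Int) : List Int := (PySem.List.pyRange 0 ((1 : Int) <<< d.toNat) 1).map (gB d)

theorem pv_Bshape : pvB_raw = blockB 1 ++ blockB 2 ++ blockB 3 ++ blockB 4 ++ blockB 5 ++ blockB 6
    ++ blockB 7 ++ blockB 8 ++ blockB 9 ++ blockB 10 := by
  unfold pvB_raw
  rw [show PySem.List.pyRange 1 11 1 = [1,2,3,4,5,6,7,8,9,10] from by decide]
  simp only [List.foldl_cons, List.foldl_nil, PySem.List.foldl_append_singleton_eq_map]
  simp only [blockB, List.nil_append, List.append_assoc]
  rfl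

set_option maxRecDepth 100000 in
theorem pv_b1 : blockB 1 = [4, 7] := by decide
set_option maxRecDepth 100000 in
theorem pv_b2 : blockB 2 = parseBlock S2 := by decide
set_option maxRecDepth 100000 in
theorem pv_b3 : blockB 3 = parseBlock S3 := by decide
set_option maxRecDepth 100000 in
theorem pv_b4 : blockB 4 = parseBlock S4 := by decide
set_option maxRecDepth 100000 in
theorem pv_b5 : blockB 5 = parseBlock S5 := by decide
set_option maxRecDepth 100000 in
theorem pv_b6 : blockB 6 = parseBlock S6 := by decide
set_option maxRecDepth 100000 in
theorem pv_b7 : blockB 7 = parseBlock S7 := by decide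
set_option maxRecDepth 100000 in
theorem pv_b8 : blockB 8 = parseBlock S8 := by decide
set_option maxRecDepth 100000 in
theorem pv_b9 : blockB 9 = parseBlock S9 := by decide
set_option maxRecDepth 200000 in
set_option maxHeartbeats 2000000 in
theorem pv_b10 : blockB 10 = parseBlock S10 := by decide

-- every fold step keeps the built value at least 4
theorem gB_aux (L : List Int) : ∀ (st : Int × Int), 4 ≤ st.1 →
    4 ≤ (L.foldl (fun (st : Int × Int) _ =>
      (st.1 * 10 + (if PySem.Int.mod st.2 2 = 0 then 4 else 7), PySem.Int.floordiv st.2 2)) st).1 := by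
  induction L with
  | nil => intro st h; exact h
  | cons c L' ih =>
    intro st h
    simp only [List.foldl_cons]
    apply ih
    dsimp only
    split <;> omega

theorem gB_ge4 (d i : Int) (hd : 0 < d) : 4 ≤ gB d i := by
  unfold gB
  rw [PySem.List.pyRange_one_cons hd, List.foldl_cons]
  apply gB_aux
  dsimp only
  split <;> omega

-- A's raw generation is B's raw generation with the two one-digit numbers moved to the front
theorem pv_split : pvB_raw = [4, 7] ++ pvA_gen.2 := by
  rw [pv_Bshape, pv_Ashape, pv_b1, pv_b2, pv_b3, pv_b4, pv_b5, pv_b6, pv_b7, pv_b8, pv_b9, pv_b10]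
  simp [List.append_assoc]

theorem pv_perm : (pvA_gen.2 ++ [4, 7]).Perm pvB_raw := by
  rw [pv_split]
  exact List.perm_append_comm

theorem pv_x_eq : pvA_x = pvB_lucky := by
  exact List.Perm.eq_of_pairwise (le := (· ≤ ·))
    (fun a b _ _ h1 h2 => le_antisymm h1 h2)
    (PySem.List.sorted_pairwise _ _) (PySem.List.sorted_pairwise _ _)
    (((PySem.List.sorted_perm _ _ _).trans pv_perm).trans (PySem.List.sorted_perm _ _ _).symm)

-- every generated number is at least 4, and 4 itself and 4444444444 occur
theorem pv_ge4 : ∀ y ∈ pvB_raw, (4 : Int) ≤ y := by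
  intro y hy
  rw [pv_Bshape] at hy
  simp only [blockB, List.mem_append, List.mem_map] at hy
  rcases hy with ((((((((⟨i,_,rfl⟩|⟨i,_,rfl⟩)|⟨i,_,rfl⟩)|⟨i,_,rfl⟩)|⟨i,_,rfl⟩)|⟨i,_,rfl⟩)|⟨i,_,rfl⟩)|⟨i,_,rfl⟩)|⟨i,_,rfl⟩)|⟨i,_,rfl⟩ <;>
    exact gB_ge4 _ _ (by norm_num)

theorem pv_mem4 : (4 : Int) ∈ pvB_raw := by
  rw [pv_split]; exact List.mem_cons_self

theorem pv_mem_big : (4444444444 : Int) ∈ pvB_raw := by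
  rw [pv_Bshape]
  simp only [List.mem_append]
  right
  refine List.mem_map.mpr ⟨0, ?_, by decide⟩
  exact PySem.List.mem_pyRange_one.mpr ⟨le_rfl, by decide⟩

theorem pv_head4 : pvB_lucky.getD 0 0 = 4 := by
  have h4 : (4 : Int) ∈ pvB_lucky :=
    (PySem.List.mem_sorted pvB_raw (fun v : Int => v) false 4).mpr pv_mem4
  obtain ⟨h, t, hht⟩ : ∃ h t, pvB_lucky = h :: t := by
    cases hpv : pvB_lucky with
    | nil => rw [hpv] at h4; cases h4
    | cons h t => exact ⟨h, t, rfl⟩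
  have hle : h ≤ 4 := PySem.List.key_head_sorted_le pvB_raw (fun v : Int => v) hht 4 pv_mem4
  have hge : (4 : Int) ≤ h := by
    apply pv_ge4 h
    apply (PySem.List.mem_sorted pvB_raw (fun v : Int => v) false h).mp
    show h ∈ pvB_lucky
    rw [hht]
    exact List.mem_cons_self
  rw [hht]
  simp only [List.getD_cons_zero]
  omega

theorem pv_chain : List.IsChain (· ≤ ·) pvB_lucky :=
  List.Pairwise.isChain (PySem.List.sorted_pairwise pvB_raw (fun v : Int => v))

-- structural prefix-sum scan (proof-side restatement of A's table)
def sumsAux : List Int → Int → Int → List Int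
  | [], _, _ => []
  | x :: rest, p, s => (s + (x - p) * x) :: sumsAux rest x (s + (x - p) * x)

theorem length_sumsAux (xs : List Int) (p s : Int) : (sumsAux xs p s).length = xs.length := by
  induction xs generalizing p s with
  | nil => rfl
  | cons x rest ih => simp [sumsAux, ih]

theorem sumsAux_getD_succ (xs : List Int) (p s : Int) (n : Nat) (h : n + 1 < xs.length) :
    (sumsAux xs p s).getD (n + 1) 0 =
      (sumsAux xs p s).getD n 0 + (xs.getD (n + 1) 0 - xs.getD n 0) * xs.getD (n + 1) 0 := by
  induction xs generalizing p s n with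
  | nil => simp at h
  | cons x rest ih =>
    match rest, h with
    | y :: rest2, h =>
      match n with
      | 0 => simp only [sumsAux, List.getD_cons_succ, List.getD_cons_zero]
      | n + 1 =>
        have h' : n + 1 < (y :: rest2).length := by simpa using h
        simpa [sumsAux] using ih x (s + (x - p) * x) n h'

-- A's index-based prefix-table loop builds exactly sumsAux, step by step
theorem pv_sums_take (xs : List Int) (hhead : xs.getD 0 0 = 4) (n : Nat) (h1 : 1 ≤ n)
    (h2 : n ≤ xs.length) :
    (PySem.List.pyRange 1 (n : Int) 1).foldl (fun s i =>
      s ++ [(PySem.List.pyGetD xs i 0 - PySem.List.pyGetD xs (i - 1) 0) * PySem.List.pyGetD xs i 0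
            + PySem.List.pyGetD s (i - 1) 0]) [16] = (sumsAux xs 0 0).take n := by
  induction n with
  | zero => omega
  | succ n ih =>
    by_cases hn : n = 0
    · subst hn
      match xs, h2 with
      | x :: rest, _ =>
        have hx : x = 4 := by simpa using hhead
        rw [show ((1 : Nat) : Int) = 1 by norm_num, PySem.List.pyRange_one_eq_nil le_rfl]
        simp [sumsAux, hx]
    · have h1' : 1 ≤ n := by omega
      have h2' : n ≤ xs.length := by omega
      have hlen : n < xs.length := by omega
      have hlenS : n < (sumsAux xs 0 0).length := by rw [length_sumsAux]; omega
      have hcast : ((n + 1 : Nat) : Int) = (n : Int) + 1 := by push_cast; ring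
      rw [hcast, PySem.List.pyRange_one_succ_right (by omega), List.foldl_append, ih h1' h2']
      simp only [List.foldl_cons, List.foldl_nil]
      have e1 : PySem.List.pyGetD xs ((n : Int)) 0 = xs.getD n 0 := PySem.List.pyGetD_natCast xs n 0
      have e2 : ((n : Int) - 1) = ((n - 1 : Nat) : Int) := by omega
      have e3 : PySem.List.pyGetD xs ((n : Int) - 1) 0 = xs.getD (n - 1) 0 := by
        rw [e2]; exact PySem.List.pyGetD_natCast xs (n - 1) 0
      have e4 : PySem.List.pyGetD ((sumsAux xs 0 0).take n) ((n : Int) - 1) 0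
          = (sumsAux xs 0 0).getD (n - 1) 0 := by
        rw [e2, PySem.List.pyGetD_natCast]
        unfold List.getD
        rw [List.getElem?_take_of_lt (by omega)]
      have e5 : (sumsAux xs 0 0).getD n 0
          = (sumsAux xs 0 0).getD (n - 1) 0 + (xs.getD n 0 - xs.getD (n - 1) 0) * xs.getD n 0 := by
        have := sumsAux_getD_succ xs 0 0 (n - 1) (by omega)
        rw [show n - 1 + 1 = n by omega] at this
        exact this
      rw [e1, e3, e4, List.take_succ]
      rw [List.getElem?_eq_getElem hlenS]
      simp only [Option.toList_some]
      have e6 : (xs.getD n 0 - xs.getD (n - 1) 0) * xs.getD n 0 + (sumsAux xs 0 0).getD (n - 1) 0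
          = (sumsAux xs 0 0)[n] := by
        rw [← List.getD_eq_getElem _ 0 hlenS, e5]; ring
      rw [e6]

theorem pv_sums_eq : pvA_sums = sumsAux pvA_x 0 0 := by
  have hhead : pvA_x.getD 0 0 = 4 := by rw [pv_x_eq]; exact pv_head4
  have hne : 1 ≤ pvA_x.length := by
    rw [pv_x_eq]
    have := (PySem.List.mem_sorted pvB_raw (fun v : Int => v) false 4 |>.mpr pv_mem4)
    exact List.length_pos_of_mem this
  unfold pvA_sums
  rw [pv_sums_take pvA_x hhead pvA_x.length hne le_rfl, ← length_sumsAux pvA_x 0 0,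
    List.take_length]

-- the found index exists when some element is large enough
theorem pv_find_some (xs : List Int) (v : Int) (x : Int) (hx : x ∈ xs) (hvx : v ≤ x) :
    ∃ k, pvA_find xs v = some k := by
  induction xs with
  | nil => cases hx
  | cons y rest ih =>
    by_cases hy : y ≥ v
    · exact ⟨0, by simp [pvA_find, hy]⟩
    · rcases List.mem_cons.mp hx with rfl | hx
      · omega
      · rcases ih hx with ⟨k, hk⟩
        exact ⟨k + 1, by simp [pvA_find, hy, hk]⟩

-- table entry minus A's correction term = B's fused scan, at the exact threshold (m = r side)
theorem pv_L1 (xs : List Int) (p s m : Int) (k : Nat) (hk : pvA_find xs m = some k) :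
    (sumsAux xs p s).getD k 0 - xs.getD k 0 * (xs.getD k 0 - m) = pvB_prefix xs s p m := by
  induction xs generalizing p s k with
  | nil => simp [pvA_find] at hk
  | cons x rest ih =>
    by_cases hx : x ≥ m
    · simp only [pvA_find, if_pos hx] at hk
      cases hk
      simp only [sumsAux, pvB_prefix, List.getD_cons_zero, if_pos (by omega : m ≤ x)]
      ring
    · simp only [pvA_find, if_neg hx, Option.map_eq_some_iff] at hk
      obtain ⟨k', hk', rfl⟩ := hk
      simp only [sumsAux, pvB_prefix, List.getD_cons_succ, if_neg (by omega : ¬ m ≤ x)]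
      exact ih x (s + (x - p) * x) k' hk'

-- once the scan has passed an element equal to m-1, every element up to the found index
-- equals m-1 and contributes nothing; the accumulator is already the answer
theorem pv_L2_aux (rest : List Int) (m : Int) :
    ∀ (s' : Int), List.IsChain (· ≤ ·) ((m - 1) :: rest) → ∀ k', pvA_find rest m = some k' →
      (sumsAux rest (m - 1) s').getD k' 0 - rest.getD k' 0 * (rest.getD k' 0 - (m - 1)) = s' := by
  induction rest with
  | nil => intro s' _ k' hk'; simp [pvA_find] at hk'
  | cons y rest2 ih =>
    intro s' hch k' hk'
    have hmy : m - 1 ≤ y := (List.isChain_cons_cons.mp hch).1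
    by_cases hy : y ≥ m
    · simp only [pvA_find, if_pos hy] at hk'
      cases hk'
      simp only [sumsAux, List.getD_cons_zero]
      ring
    · have hy' : y = m - 1 := by omega
      simp only [pvA_find, if_neg hy, Option.map_eq_some_iff] at hk'
      obtain ⟨k'', hk'', rfl⟩ := hk'
      simp only [sumsAux, List.getD_cons_succ]
      have hch2 : List.IsChain (· ≤ ·) ((m - 1) :: rest2) := by
        have h2 := (List.isChain_cons_cons.mp hch).2
        rwa [hy'] at h2
      have hrec := ih (s' + (y - (m - 1)) * y) hch2 k'' hk''
      rw [hy'] at hrec ⊢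
      simpa using hrec

-- same at threshold m-1, where A still searches with m (l side)
theorem pv_L2 (xs : List Int) (hch : List.IsChain (· ≤ ·) xs) (p s m : Int) (k : Nat)
    (hk : pvA_find xs m = some k) :
    (sumsAux xs p s).getD k 0 - xs.getD k 0 * (xs.getD k 0 - (m - 1)) = pvB_prefix xs s p (m - 1) := by
  induction xs generalizing p s k with
  | nil => simp [pvA_find] at hk
  | cons x rest ih =>
    by_cases hx : x ≥ m
    · simp only [pvA_find, if_pos hx] at hk
      cases hk
      simp only [sumsAux, pvB_prefix, List.getD_cons_zero, if_pos (by omega : m - 1 ≤ x)]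
      ring
    · simp only [pvA_find, if_neg hx, Option.map_eq_some_iff] at hk
      obtain ⟨k', hk', rfl⟩ := hk
      by_cases hx2 : m - 1 ≤ x
      · have hx' : x = m - 1 := by omega
        simp only [sumsAux, pvB_prefix, List.getD_cons_succ, if_pos hx2]
        have := pv_L2_aux rest m (s + (x - p) * x) (by rwa [hx'] at hch) k' hk'
        rw [hx'] at this ⊢
        linarith [this]
      · simp only [sumsAux, pvB_prefix, List.getD_cons_succ, if_neg hx2]
        exact ih hch.tail x (s + (x - p) * x) k' hk'

-- ===== VERDICT (by name: the statement is the Claim_ definition above) =====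
theorem calculate_lucky_sum_spec : Claim_equal_calculate_lucky_sum := by
  intro l r hdom
  unfold Dom_calculate_lucky_sum pvDomInt at hdom
  simp only [Bool.and_eq_true, decide_eq_true_eq] at hdom
  have hbig : (4444444444 : Int) ∈ pvB_lucky :=
    (PySem.List.mem_sorted pvB_raw (fun v : Int => v) false 4444444444 |>.mpr pv_mem_big)
  obtain ⟨t, ht⟩ := pv_find_some pvB_lucky l 4444444444 hbig (by omega)
  obtain ⟨e, he⟩ := pv_find_some pvB_lucky r 4444444444 hbig (by omega)
  show _ = _
  unfold calculate_lucky_sum calculate_lucky_sum_alt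
  rw [pv_sums_eq, pv_x_eq, ht, he]
  have h1 := pv_L1 pvB_lucky 0 0 r e he
  have h2 := pv_L2 pvB_lucky pv_chain 0 0 l t ht
  simp only [Option.getD_some]
  linarith [h1, h2]
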